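-- pv_equiv track=rewrite | github.com/sgfn/miscellaneous | wdi/3-ob.py | e_value
-- ===== SOURCE A (Python) =====
-- def e_value(n):
--     val = [0 for _ in range(n+1)]
--     val[0] = 1
--     comp = val.copy()
--     i = 2
--     while max(comp) > 0:
--         next = 0
--         for j in range(n, -1, -1):
--             val[j] += comp[j] + next
--             next = val[j] // 10
--             val[j] %= 10
--         next = 0
--         for j in range(n+1):
--             next += comp[j]
--             comp[j] = next//i
--             next = next%i*10
--         i += 1
--     return val
-- ===== SOURCE B (Python) =====
-- def e_value(n):
--     # digits of e in fixed point: V = 10**n * (1 + sum 1/k!) via nested floor division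
--     V = term = 10 ** n
--     i = 2
--     while term > 0:
--         V += term
--         term //= i
--         i += 1
--     digits = []
--     for _ in range(n + 1):
--         digits.append(V % 10)
--         V //= 10
--     digits.reverse()
--     return digits
-- ===== Notes on version B (the rewrite author's own statement) =====
-- stated objective: simpler
-- what changed: B replaces A's hand-rolled digit-array long arithmetic (digit-wise add with carry and digit-wise long division per term) by two plain big-integer variables V and term with V += term; term //= i, followed by a single digit-extraction pass, relying on digit-wise long division equalling integer floor division.
import Mathlib
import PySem

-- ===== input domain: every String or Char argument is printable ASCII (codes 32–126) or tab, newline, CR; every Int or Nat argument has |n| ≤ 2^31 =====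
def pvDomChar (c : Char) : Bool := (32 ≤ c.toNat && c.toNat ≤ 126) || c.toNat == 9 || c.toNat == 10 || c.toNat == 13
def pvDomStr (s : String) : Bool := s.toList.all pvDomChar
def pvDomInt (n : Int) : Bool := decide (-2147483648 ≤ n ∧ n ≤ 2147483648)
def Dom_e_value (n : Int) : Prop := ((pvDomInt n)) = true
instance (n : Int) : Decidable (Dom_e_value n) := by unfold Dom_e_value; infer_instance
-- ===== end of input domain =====

-- B replaces A's digit-array long arithmetic by plain big-integer arithmetic (V, term : Int) with one digit-extraction pass at the end; equivalence is about return values (neither mutates its input).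

-- value of a big-endian digit list (used by the proofs and the termination measures)
def val10 : List Int → Int
  | [] => 0
  | d :: l => d * 10 ^ l.length + val10 l

-- ===== PORT A =====
-- the inner `for j in range(n,-1,-1)` of A: add comp into val right-to-left with carry `next`
-- (returns the new digits and the final carry, which Python discards)
def addDigits : List Int → List Int → List Int × Int
  | v :: vs, c :: cs =>
      let (ws, carry) := addDigits vs cs
      let t := v + c + carry
      (PySem.Int.mod t 10 :: ws, PySem.Int.floordiv t 10)
  | _, _ => ([], 0)      -- unreachable: val and comp always have equal length
-- the inner `for j in range(n+1)` of A: long division of comp by i left-to-right; Python keeps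
-- `next = rem*10` across iterations, here the carry r is the remainder itself and next = r*10 + c
def divDigits : List Int → Int → Int → List Int × Int
  | [], _, r => ([], r)
  | c :: cs, i, r =>
      let next := r * 10 + c
      let (out, rf) := divDigits cs i (PySem.Int.mod next i)
      (PySem.Int.floordiv next i :: out, rf)

lemma divDigits_len : ∀ (cs : List Int) (i r : Int), (divDigits cs i r).1.length = cs.length := by
  intro cs
  induction cs with
  | nil => simp [divDigits]
  | cons c cs ih => intro i r; simp [divDigits, ih]

lemma divDigits_val : ∀ (cs : List Int) (i r : Int),
    i * val10 (divDigits cs i r).1 + (divDigits cs i r).2 = r * 10 ^ cs.length + val10 cs := by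
  intro cs
  induction cs with
  | nil => intro i r; simp [divDigits, val10]
  | cons c cs ih =>
      intro i r
      simp only [divDigits, val10, List.length_cons]
      have h := ih i (PySem.Int.mod (r * 10 + c) i)
      have hdm := PySem.Int.floordiv_mul_add_mod (r * 10 + c) i
      rw [divDigits_len]
      linear_combination h + 10 ^ cs.length * hdm

lemma divDigits_rem : ∀ (cs : List Int) (i r : Int), 0 < i → 0 ≤ r → r < i →
    0 ≤ (divDigits cs i r).2 ∧ (divDigits cs i r).2 < i := by
  intro cs
  induction cs with
  | nil => intro i r _ h1 h2; simpa [divDigits] using ⟨h1, h2⟩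
  | cons c cs ih =>
      intro i r hi _ _
      simp only [divDigits]
      exact ih i _ hi (PySem.Int.mod_nonneg _ hi) (PySem.Int.mod_lt _ hi)

lemma divDigits_nonneg : ∀ (cs : List Int) (i r : Int), 0 < i → 0 ≤ r →
    (∀ c ∈ cs, 0 ≤ c) → ∀ d ∈ (divDigits cs i r).1, 0 ≤ d := by
  intro cs
  induction cs with
  | nil => simp [divDigits]
  | cons c cs ih =>
      intro i r hi hr hcs d hd
      simp only [divDigits, List.mem_cons] at hd
      rcases hd with h | h
      · subst h
        rw [PySem.Int.floordiv_eq_ediv_of_pos hi]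
        exact Int.ediv_nonneg (by have := hcs c (by simp); omega) (by omega)
      · exact ih i _ hi (PySem.Int.mod_nonneg _ hi) (fun x hx => hcs x (by simp [hx])) d h

lemma val10_nonneg : ∀ (l : List Int), (∀ d ∈ l, 0 ≤ d) → 0 ≤ val10 l := by
  intro l
  induction l with
  | nil => simp [val10]
  | cons d l ih =>
      intro h
      simp only [val10]
      have h1 : (0:Int) ≤ d := h d (by simp)
      have h2 := ih (fun x hx => h x (by simp [hx]))
      positivity

lemma val10_pos_iff : ∀ (l : List Int), (∀ d ∈ l, 0 ≤ d) →
    (0 < val10 l ↔ ∃ x ∈ l, 0 < x) := by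
  intro l
  induction l with
  | nil => simp [val10]
  | cons d l ih =>
      intro h
      have h1 : (0:Int) ≤ d := h d (by simp)
      have h2 := val10_nonneg l (fun x hx => h x (by simp [hx]))
      have h3 := ih (fun x hx => h x (by simp [hx]))
      have hp : (0:Int) < 10 ^ l.length := by positivity
      simp only [val10, List.mem_cons]
      constructor
      · intro hv
        by_cases hd : 0 < d
        · exact ⟨d, Or.inl rfl, hd⟩
        · have : d = 0 := by omega
          subst this
          simp only [zero_mul, zero_add] at hv
          obtain ⟨x, hx, hx0⟩ := h3.mp hv
          exact ⟨x, Or.inr hx, hx0⟩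
      · rintro ⟨x, hx | hx, hx0⟩
        · subst hx; nlinarith
        · have := h3.mpr ⟨x, hx, hx0⟩; nlinarith

-- Python's `max(comp) > 0` for a list of nonnegative digits
lemma maxD_pos_iff (l : List Int) (h : ∀ d ∈ l, 0 ≤ d) :
    (0 < (l.max?.getD 0) ↔ 0 < val10 l) := by
  rw [val10_pos_iff l h]
  rcases hm : l.max? with _ | m
  · simp [List.max?_eq_none_iff.mp hm]
  · have hsome := List.max?_eq_some_iff.mp hm
    simp only [Option.getD_some]
    constructor
    · intro h0; exact ⟨m, hsome.1, h0⟩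
    · rintro ⟨x, hx, hx0⟩; exact lt_of_lt_of_le hx0 (hsome.2 x hx)

lemma floordiv_halve {v i : Int} (hv : 0 ≤ v) (hi : 2 ≤ i) :
    2 * PySem.Int.floordiv v i ≤ v ∧ 0 ≤ PySem.Int.floordiv v i := by
  rw [PySem.Int.floordiv_eq_ediv_of_pos (by omega)]
  have hq : 0 ≤ v / i := Int.ediv_nonneg hv (by omega)
  have hm := Int.ediv_add_emod v i
  have hr := Int.emod_nonneg v (by omega : i ≠ 0)
  exact ⟨by nlinarith, hq⟩

lemma divDigits_floordiv (cs : List Int) (i : Int) (hi : 2 ≤ i) :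
    val10 (divDigits cs i 0).1 = PySem.Int.floordiv (val10 cs) i := by
  have hv := divDigits_val cs i 0
  have hr := divDigits_rem cs i 0 (by omega) le_rfl (by omega)
  symm
  rw [PySem.Int.floordiv_eq_iff_of_pos (by omega : (0:Int) < i)]
  constructor <;> nlinarith [hv, hr.1, hr.2]

-- A's outer while loop; the Prop arguments record the loop invariant needed for termination
def loopA (val comp : List Int) (i : Int) (hc : ∀ d ∈ comp, 0 ≤ d) (hi : 2 ≤ i) : List Int :=
  if hm : 0 < (comp.max?.getD 0) then
    loopA (addDigits val comp).1 (divDigits comp i 0).1 (i + 1)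
      (divDigits_nonneg comp i 0 (by omega) le_rfl hc) (by omega)
  else val
termination_by (val10 comp).toNat
decreasing_by
  have hpos : 0 < val10 comp := (maxD_pos_iff comp hc).mp hm
  have h1 := divDigits_floordiv comp i hi
  have h2 := floordiv_halve (le_of_lt hpos) hi
  rw [h1]
  omega

def e_value (n : Int) : List Int :=
  if h : 0 ≤ n then
    -- val = [0]*(n+1); val[0] = 1; comp = val.copy()
    let val : List Int := 1 :: List.replicate n.toNat 0
    loopA val val 2
      (by intro d hd
          rcases List.mem_cons.mp hd with h | h
          · omega
          · have := List.eq_of_mem_replicate h; omega)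
      (by omega)
  else []  -- Python: val = [] and `val[0] = 1` raises IndexError (outside Pre_)

-- ===== PORT B =====
-- B's while loop on plain integers: while term > 0: V += term; term //= i; i += 1
def loopB (V term i : Int) (ht : 0 ≤ term) (hi : 2 ≤ i) : Int :=
  if h : 0 < term then
    loopB (V + term) (PySem.Int.floordiv term i) (i + 1)
      (floordiv_halve ht hi).2 (by omega)
  else V
termination_by term.toNat
decreasing_by
  have h2 := floordiv_halve ht hi
  omega

-- B's digit loop: k times append V % 10 and halve V by 10 (before the final reverse)
def digitsRev : Nat → Int → List Int
  | 0, _ => []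
  | k + 1, V => PySem.Int.mod V 10 :: digitsRev k (PySem.Int.floordiv V 10)

def e_value_alt (n : Int) : List Int :=
  if h : 0 ≤ n then
    let p : Int := (10 : Int) ^ n.toNat
    (digitsRev (n + 1).toNat (loopB p p 2 (by positivity) (by omega))).reverse
  else []  -- Python: 10**n is a float below 1, the while loop ends at once and range(n+1) is empty

-- ===== PRECONDITION & SPEC =====
-- Pre_ excludes n < 0, where A raises IndexError on `val[0] = 1` (val is empty there).
def Pre_e_value (n : Int) : Prop := 0 ≤ n
instance (n : Int) : Decidable (Pre_e_value n) := by unfold Pre_e_value; infer_instance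
def pvWitness_e_value : Int := 3

def Spec_e_value (n : Int) (out : List Int) : Prop := out = e_value_alt n
instance (n : Int) (out : List Int) : Decidable (Spec_e_value n out) := by unfold Spec_e_value; infer_instance

-- ===== CLAIM (what is proved, stated in full; the proofs are below) =====
def Claim_equal_e_value : Prop := ∀ (n : Int), Dom_e_value n → Pre_e_value n → Spec_e_value n (e_value n)

-- ===== LEMMAS AND PROOFS =====

lemma loopB_congr {V V' t t' i : Int} (hV : V = V') (ht2 : t = t')
    (p : 0 ≤ t) (q : 2 ≤ i) (p' : 0 ≤ t') (q' : 2 ≤ i) :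
    loopB V t i p q = loopB V' t' i p' q' := by
  subst hV; subst ht2; rfl

lemma addDigits_spec : ∀ (vs cs : List Int), vs.length = cs.length →
    (addDigits vs cs).1.length = vs.length ∧
    (∀ d ∈ (addDigits vs cs).1, 0 ≤ d ∧ d < 10) ∧
    10 ^ vs.length * (addDigits vs cs).2 + val10 (addDigits vs cs).1 = val10 vs + val10 cs := by
  intro vs
  induction vs with
  | nil =>
      intro cs h
      cases cs with
      | nil => simp [addDigits, val10]
      | cons c cs => simp at h
  | cons v vs ih =>
      intro cs h
      cases cs with
      | nil => simp at h
      | cons c cs =>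
          have hlen : vs.length = cs.length := by simpa using h
          obtain ⟨ih1, ih2, ih3⟩ := ih cs hlen
          simp only [addDigits, val10, List.length_cons]
          refine ⟨by simp [ih1], ?_, ?_⟩
          · intro d hd
            rcases List.mem_cons.mp hd with hd | hd
            · subst hd
              exact ⟨PySem.Int.mod_nonneg _ (by omega), PySem.Int.mod_lt _ (by omega)⟩
            · exact ih2 d hd
          · rw [ih1, ← hlen]
            have hdm := PySem.Int.floordiv_mul_add_mod (v + c + (addDigits vs cs).2) 10
            linear_combination ih3 + 10 ^ vs.length * hdm

lemma val10_lt (l : List Int) (h : ∀ d ∈ l, 0 ≤ d ∧ d < 10) : val10 l < 10 ^ l.length := by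
  induction l with
  | nil => simp [val10]
  | cons d l ih =>
      have hd := h d (by simp)
      have hl := ih (fun x hx => h x (by simp [hx]))
      have hp : (0:Int) < 10 ^ l.length := by positivity
      simp only [val10, List.length_cons, pow_succ]
      nlinarith

lemma loopA_spec : ∀ (m : Nat) (val comp : List Int) (i : Int)
    (hc : ∀ d ∈ comp, 0 ≤ d) (hi : 2 ≤ i) (ht : 0 ≤ val10 comp),
    (val10 comp).toNat = m →
    (∀ d ∈ val, 0 ≤ d ∧ d < 10) → val.length = comp.length →
    val10 val + 2 * val10 comp < 10 ^ val.length →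
    (loopA val comp i hc hi).length = val.length ∧
    (∀ d ∈ loopA val comp i hc hi, 0 ≤ d ∧ d < 10) ∧
    val10 (loopA val comp i hc hi) = loopB (val10 val) (val10 comp) i ht hi := by
  intro m
  induction m using Nat.strong_induction_on with
  | _ m IH =>
    intro val comp i hc hi ht hm hv hlen hb
    have hvv : 0 ≤ val10 val := val10_nonneg val (fun d hd => (hv d hd).1)
    by_cases hg : 0 < (comp.max?.getD 0)
    · have hcpos : 0 < val10 comp := (maxD_pos_iff comp hc).mp hg
      obtain ⟨a1, a2, a3⟩ := addDigits_spec val comp hlen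
      have hP : (0:Int) < 10 ^ val.length := by positivity
      have hw0 : 0 ≤ val10 (addDigits val comp).1 :=
        val10_nonneg _ (fun d hd => (a2 d hd).1)
      have hw1 : val10 (addDigits val comp).1 < 10 ^ val.length := by
        have := val10_lt (addDigits val comp).1 a2
        rwa [a1] at this
      have hsum : val10 val + val10 comp < 10 ^ val.length := by omega
      have hcarry : (addDigits val comp).2 = 0 := by
        rcases lt_trichotomy (addDigits val comp).2 0 with hcy | hcy | hcy
        · have : 10 ^ val.length * (addDigits val comp).2 ≤ 10 ^ val.length * (-1) :=
            mul_le_mul_of_nonneg_left (by omega) (le_of_lt hP)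
          nlinarith
        · exact hcy
        · have : 10 ^ val.length * 1 ≤ 10 ^ val.length * (addDigits val comp).2 :=
            mul_le_mul_of_nonneg_left (by omega) (le_of_lt hP)
          nlinarith
      have hvval' : val10 (addDigits val comp).1 = val10 val + val10 comp := by
        rw [hcarry] at a3; linarith [a3]
      have hvcomp' : val10 (divDigits comp i 0).1 = PySem.Int.floordiv (val10 comp) i :=
        divDigits_floordiv comp i hi
      have hhalf := floordiv_halve (le_of_lt hcpos) hi
      have hlt : (val10 (divDigits comp i 0).1).toNat < m := by rw [hvcomp']; omega
      have ht' : 0 ≤ val10 (divDigits comp i 0).1 := by rw [hvcomp']; omega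
      have hlen' : (addDigits val comp).1.length = (divDigits comp i 0).1.length := by
        rw [a1, divDigits_len, hlen]
      have hb' : val10 (addDigits val comp).1 + 2 * val10 (divDigits comp i 0).1 <
          10 ^ (addDigits val comp).1.length := by
        rw [a1, hvval', hvcomp']; omega
      obtain ⟨L1, L2, L3⟩ := IH _ hlt (addDigits val comp).1 (divDigits comp i 0).1 (i + 1)
        (divDigits_nonneg comp i 0 (by omega) le_rfl hc) (by omega) ht' rfl a2 hlen' hb'
      rw [loopA, dif_pos hg]
      refine ⟨by rw [L1, a1], L2, ?_⟩
      rw [loopB, dif_pos hcpos, L3]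
      exact loopB_congr hvval' hvcomp' _ _ _ _
    · have hc0 : ¬ 0 < val10 comp := fun hx => hg ((maxD_pos_iff comp hc).mpr hx)
      rw [loopA, dif_neg hg, loopB, dif_neg hc0]
      exact ⟨rfl, hv, rfl⟩

lemma val10_append_singleton : ∀ (l : List Int) (d : Int), val10 (l ++ [d]) = 10 * val10 l + d := by
  intro l
  induction l with
  | nil => simp [val10]
  | cons x l ih =>
      intro d
      simp only [List.cons_append, val10, List.length_append, List.length_cons, ih,
        List.length_nil]
      ring

lemma digitsRev_val (l : List Int) (h : ∀ d ∈ l, 0 ≤ d ∧ d < 10) :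
    digitsRev l.length (val10 l) = l.reverse := by
  induction l using List.reverseRecOn with
  | nil => simp [digitsRev, val10]
  | append_singleton l d ih =>
      have hd : 0 ≤ d ∧ d < 10 := h d (by simp)
      have hlen : (l ++ [d]).length = l.length + 1 := by simp
      rw [hlen, val10_append_singleton]
      simp only [digitsRev]
      have hmod : PySem.Int.mod (10 * val10 l + d) 10 = d := by
        rw [PySem.Int.mod_eq_emod_of_pos (by omega)]; omega
      have hdiv : PySem.Int.floordiv (10 * val10 l + d) 10 = val10 l := by
        rw [PySem.Int.floordiv_eq_ediv_of_pos (by omega)]; omega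
      rw [hmod, hdiv, ih (fun x hx => h x (by simp [hx]))]
      simp

lemma val10_replicate_zero (k : Nat) : val10 (List.replicate k 0) = 0 := by
  induction k with
  | zero => simp [val10]
  | succ k ih => simp [List.replicate_succ, val10, ih]

-- ===== VERDICT (by name: the statement is the Claim_ definition above) =====
theorem e_value_spec : Claim_equal_e_value := by
  intro n _ hpre
  unfold Pre_e_value at hpre
  unfold Spec_e_value e_value e_value_alt
  rw [dif_pos hpre, dif_pos hpre]
  dsimp only
  have hdig : ∀ d ∈ (1 :: List.replicate n.toNat (0:Int)), 0 ≤ d ∧ d < 10 := by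
    intro d hd
    rcases List.mem_cons.mp hd with h | h
    · omega
    · have := List.eq_of_mem_replicate h; omega
  have hval0 : val10 (1 :: List.replicate n.toNat (0:Int)) = 10 ^ n.toNat := by
    simp [val10, val10_replicate_zero]
  have hlen0 : (1 :: List.replicate n.toNat (0:Int)).length = n.toNat + 1 := by simp
  have hP : (0:Int) < 10 ^ n.toNat := by positivity
  have hb : val10 (1 :: List.replicate n.toNat (0:Int)) +
      2 * val10 (1 :: List.replicate n.toNat (0:Int)) <
      10 ^ (1 :: List.replicate n.toNat (0:Int)).length := by
    rw [hval0, hlen0, pow_succ]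
    nlinarith
  have ht : 0 ≤ val10 (1 :: List.replicate n.toNat (0:Int)) := by rw [hval0]; omega
  obtain ⟨L1, L2, L3⟩ := loopA_spec (val10 (1 :: List.replicate n.toNat (0:Int))).toNat
    (1 :: List.replicate n.toNat (0:Int)) (1 :: List.replicate n.toNat (0:Int)) 2
    (by intro d hd
        rcases List.mem_cons.mp hd with h | h
        · omega
        · have := List.eq_of_mem_replicate h; omega)
    (by omega) ht rfl hdig rfl hb
  have hrev := digitsRev_val _ L2
  rw [L1, hlen0] at hrev
  have hk : (n + 1).toNat = n.toNat + 1 := by omega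
  rw [hk]
  have hBeq : loopB (val10 (1 :: List.replicate n.toNat (0:Int)))
      (val10 (1 :: List.replicate n.toNat (0:Int))) 2 ht (by omega) =
      loopB ((10:Int) ^ n.toNat) ((10:Int) ^ n.toNat) 2 (by positivity) (by omega) :=
    loopB_congr hval0 hval0 _ _ _ _
  rw [L3, hBeq] at hrev
  rw [hrev]
  simp
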